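-- pv_equiv track=rewrite | github.com/gurkslask/AoC2020 | day6/main.py | parse
-- ===== SOURCE A (Python) =====
-- def parse(data):
--     plist = []
--     tlist = []
--     for row in data:
--         if row == '':
--             plist.append(tlist)
--             tlist = []
--         else:
--             tlist.append(row)
--     return plist
-- ===== SOURCE B (Python) =====
-- def parse(data):
--     data = list(data)
--     separators = [i for i, row in enumerate(data) if row == '']
--     out = []
--     start = 0
--     for i in separators:
--         out.append(data[start:i])
--         start = i + 1
--     return out
-- ===== Notes on version B (the rewrite author's own statement) =====
-- stated objective: alternative
-- what changed: Instead of accumulating rows into a running group list, B collects the indices of blank lines in one pass and then emits each group as a slice between consecutive separators (no trailing slice, matching A's dropped last group).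
import Mathlib
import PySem

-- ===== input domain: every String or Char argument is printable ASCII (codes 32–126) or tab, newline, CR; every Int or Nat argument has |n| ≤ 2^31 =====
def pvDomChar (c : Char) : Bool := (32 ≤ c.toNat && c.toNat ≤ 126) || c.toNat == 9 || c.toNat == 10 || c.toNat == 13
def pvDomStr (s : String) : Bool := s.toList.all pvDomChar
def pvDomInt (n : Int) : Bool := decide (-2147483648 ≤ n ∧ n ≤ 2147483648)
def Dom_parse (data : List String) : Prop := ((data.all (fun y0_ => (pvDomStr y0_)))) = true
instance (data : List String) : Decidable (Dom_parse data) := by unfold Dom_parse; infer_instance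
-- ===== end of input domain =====

-- B groups the rows by collecting blank-line indices first and slicing between them (alternative decomposition, same cost); return values proved equal.

-- ===== PORT A =====
-- the loop body of A: append tlist to plist on a blank row, else append the row to tlist
def parseStepA (s : List (List String) × List String) (row : String) : List (List String) × List String :=
  if row = "" then (s.1 ++ [s.2], []) else (s.1, s.2 ++ [row])

def parse (data : List String) : List (List String) :=
  (data.foldl parseStepA ([], [])).1

-- ===== PORT B =====
-- the loop body of B: out.append(data[start:i]); start = i + 1
def parseStepB (data : List String) (s : List (List String) × Int) (i : Int) : List (List String) × Int :=
  (s.1 ++ [PySem.List.slice data (some s.2) (some i)], i + 1)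

def parse_alt (data : List String) : List (List String) :=
  let separators : List Int :=
    (PySem.List.enumerate data).filterMap (fun p => if p.2 = "" then some p.1 else none)
  (separators.foldl (parseStepB data) ([], 0)).1

-- ===== PRECONDITION & SPEC =====
def Spec_parse (data : List String) (out : List (List String)) : Prop := out = parse_alt data
instance (data : List String) (out : List (List String)) : Decidable (Spec_parse data out) := by unfold Spec_parse; infer_instance

-- ===== CLAIM (what is proved, stated in full; the proofs are below) =====
def Claim_equal_parse : Prop := ∀ (data : List String), Dom_parse data → Spec_parse data (parse data)

-- ===== LEMMAS AND PROOFS =====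

-- common characterisation: groups with pending prefix `cur`, trailing group dropped
def pvGroups (cur : List String) : List String → List (List String)
  | [] => []
  | r :: rs => if r = "" then cur :: pvGroups [] rs else pvGroups (cur ++ [r]) rs

theorem parseA_inv (data : List String) :
    ∀ (acc : List (List String)) (cur : List String),
      (data.foldl parseStepA (acc, cur)).1 = acc ++ pvGroups cur data := by
  induction data with
  | nil => intro acc cur; simp [pvGroups]
  | cons r rs ih =>
    intro acc cur
    by_cases h : r = "" <;>
      simp [List.foldl_cons, parseStepA, pvGroups, h, ih]

theorem parseB_inv (data : List String) :
    ∀ (xs : List String) (s t : Nat) (acc : List (List String)),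
      t ≤ s → data.drop s = xs →
      (((PySem.List.enumerate xs (s : Int)).filterMap
          (fun p => if p.2 = "" then some p.1 else none)).foldl (parseStepB data) (acc, (t : Int))).1
        = acc ++ pvGroups ((data.drop t).take (s - t)) xs := by
  intro xs
  induction xs with
  | nil => intro s t acc _ _; simp [PySem.List.enumerate_nil, pvGroups]
  | cons r rs ih =>
    intro s t acc hts hdrop
    have hdrop' : data.drop (s + 1) = rs := by
      have := congrArg (List.drop 1) hdrop
      simpa [List.drop_drop, Nat.add_comm] using this
    rw [PySem.List.enumerate_cons]
    by_cases h : r = ""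
    · subst h
      have hsep : List.filterMap (fun (p : Int × String) => if p.2 = "" then some p.1 else none)
          (((s : Int), "") :: PySem.List.enumerate rs ((s : Int) + 1))
          = (s : Int) :: List.filterMap (fun p => if p.2 = "" then some p.1 else none)
              (PySem.List.enumerate rs ((s : Int) + 1)) := by
        simp
      rw [hsep, List.foldl_cons]
      simp only [parseStepB]
      have hcast : ((s : Int) + 1) = ((s + 1 : Nat) : Int) := by push_cast; ring
      rw [hcast, ih (s + 1) (s + 1) _ (le_refl _) hdrop']
      rw [PySem.List.slice_natCast]
      simp [pvGroups]
    · simp only [List.filterMap_cons, if_neg h]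
      have hcast : ((s : Int) + 1) = ((s + 1 : Nat) : Int) := by push_cast; ring
      rw [hcast, ih (s + 1) t acc (Nat.le_succ_of_le hts) hdrop']
      have hr : (data.drop t)[s - t]? = some r := by
        have h0 : data[s]? = some r := by
          have := congrArg (fun l => l[0]?) hdrop
          simpa using this
        rw [List.getElem?_drop]
        simpa [Nat.add_sub_cancel' hts] using h0
      have htake : (data.drop t).take (s + 1 - t) = (data.drop t).take (s - t) ++ [r] := by
        have : s + 1 - t = (s - t) + 1 := by omega
        rw [this, List.take_add_one, hr]
        rfl
      rw [htake]
      simp [pvGroups, h]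

-- ===== VERDICT (by name: the statement is the Claim_ definition above) =====
theorem parse_spec : Claim_equal_parse := by
  intro data _
  unfold Spec_parse parse parse_alt
  rw [parseA_inv data [] []]
  have := parseB_inv data data 0 0 [] (le_refl 0) (by simp)
  simpa [pvGroups] using this.symm
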